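-- pv_equiv track=rewrite | github.com/moevm/mse1h2024-clock-cv | clockcv-backend/clockcv/CV/NumberAnalizer.py | find_max_match_index
-- ===== SOURCE A (Python) =====
-- def find_max_match_index(arr):
--     max_number = float('-inf')
--     current_max = float('-inf')
--     max_index = None
--     for i in range(len(arr)):
--         if len(arr[i])!=0:
--             current_max = max(arr[i])
--         if current_max > max_number:
--             max_number = current_max
--             max_index = i
--     return max_index
-- ===== SOURCE B (Python) =====
-- def find_max_match_index(arr):
--     # Two-pass: build a forward-filled table of running sublist maxima, then take
--     # the first index where that table attains its overall maximum.
--     cm = []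
--     last = None
--     for sub in arr:
--         if sub:
--             last = max(sub)
--         cm.append(last)
--     vals = [x for x in cm if x is not None]
--     if not vals:
--         return None
--     return cm.index(max(vals))
-- ===== Notes on version B (the rewrite author's own statement) =====
-- stated objective: alternative
-- what changed: Replaces A's single stateful loop (running max, current carry, record index) by two explicit passes: build a forward-filled table of running sublist maxima, then return the first index where that table attains its overall maximum.
import Mathlib
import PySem

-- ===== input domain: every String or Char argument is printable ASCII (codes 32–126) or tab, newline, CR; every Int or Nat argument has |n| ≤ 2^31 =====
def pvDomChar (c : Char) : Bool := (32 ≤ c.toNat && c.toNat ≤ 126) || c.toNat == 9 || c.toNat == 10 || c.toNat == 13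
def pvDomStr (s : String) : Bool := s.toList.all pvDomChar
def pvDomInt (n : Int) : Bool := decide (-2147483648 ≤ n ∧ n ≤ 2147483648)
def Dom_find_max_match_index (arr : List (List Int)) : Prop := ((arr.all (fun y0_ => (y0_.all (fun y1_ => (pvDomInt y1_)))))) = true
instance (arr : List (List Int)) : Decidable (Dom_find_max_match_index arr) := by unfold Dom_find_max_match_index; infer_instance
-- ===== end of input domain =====

-- B replaces A's single stateful record-keeping loop by an explicit forward-filled
-- table of running sublist maxima plus a separate argmax pass (objective: alternative).

-- ===== PORT A =====
-- Python's float('-inf') sentinel is ported as `none`, the bottom of this strict order on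
-- Option Int (exact: every value compared against it is an int, and int > -inf always holds).
def optGt (a b : Option Int) : Bool :=
  match a, b with
  | some x, some y => decide (y < x)
  | some _, none => true
  | none, _ => false

def stepA (st : Option Int × Option Int × Option Int) (p : Int × List Int) :
    Option Int × Option Int × Option Int :=
  let max_number := st.1
  let current_max := if p.2.length ≠ 0 then PySem.List.max? p.2 (fun x => x) else st.2.1
  if optGt current_max max_number then (current_max, current_max, some p.1)
  else (max_number, current_max, st.2.2)

def find_max_match_index (arr : List (List Int)) : Option Int :=
  ((PySem.List.enumerate arr 0).foldl stepA (none, none, none)).2.2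

-- ===== PORT B =====
-- B's `None` entries of the table are `none`; `[x for x in cm if x is not None]` is filterMap id.
def stepB (st : List (Option Int) × Option Int) (sub : List Int) :
    List (Option Int) × Option Int :=
  let last := if sub ≠ [] then PySem.List.max? sub (fun x => x) else st.2
  (st.1 ++ [last], last)

-- `cm.index(m)` always succeeds in Source B (m is drawn from cm); index? is some there, mapped to Int.
def find_max_match_index_alt (arr : List (List Int)) : Option Int :=
  let cm := (arr.foldl stepB ([], none)).1
  let vals := cm.filterMap id
  match PySem.List.max? vals (fun x => x) with
  | none => none
  | some m => Option.map (fun (k : Nat) => (k : Int)) (PySem.List.index? cm (some m))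

-- ===== PRECONDITION & SPEC =====
def Spec_find_max_match_index (arr : List (List Int)) (out : Option Int) : Prop := out = find_max_match_index_alt arr
instance (arr : List (List Int)) (out : Option Int) : Decidable (Spec_find_max_match_index arr out) := by unfold Spec_find_max_match_index; infer_instance

-- ===== CLAIM (what is proved, stated in full; the proofs are below) =====
def Claim_equal_find_max_match_index : Prop := ∀ (arr : List (List Int)), Dom_find_max_match_index arr → Spec_find_max_match_index arr (find_max_match_index arr)

-- ===== LEMMAS AND PROOFS =====

-- forward-filled table of running maxima (proof-side reference for both ports)
def fill (last : Option Int) : List (List Int) → List (Option Int)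
  | [] => []
  | s :: r =>
    let l := if s.length ≠ 0 then PySem.List.max? s (fun x => x) else last
    l :: fill l r

def omax2 (a b : Option Int) : Option Int := if optGt b a then b else a

def lmax : List (Option Int) → Option Int
  | [] => none
  | x :: t => omax2 x (lmax t)

theorem optGt_none_right (a : Option Int) : optGt a none = a.isSome := by
  cases a <;> rfl

theorem omax2_none_left (b : Option Int) : omax2 none b = b := by
  cases b <;> simp [omax2, optGt]

theorem optGt_le_le {a b c : Option Int} (h1 : optGt a b = false) (h2 : optGt b c = false) :
    optGt a c = false := by
  cases a <;> cases b <;> cases c <;> simp_all [optGt]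
  omega

theorem optGt_gt_gt {a b c : Option Int} (h1 : optGt a b = true) (h2 : optGt b c = true) :
    optGt a c = true := by
  cases a <;> cases b <;> cases c <;> simp_all [optGt]
  omega

theorem optGt_ne {a b : Option Int} (h : optGt a b = true) : b ≠ a := by
  cases a <;> cases b <;> simp_all [optGt]
  omega

theorem omax2_some_some (x y : Int) (b : Option Int) :
    omax2 (some x) (omax2 (some y) b) = omax2 (some (max x y)) b := by
  cases b <;> simp [omax2, optGt] <;> split_ifs <;> simp_all <;> omega

theorem lmax_filterMap (t : List (Option Int)) (x : Int) :
    omax2 (some x) (lmax t) = some (List.foldl max x (t.filterMap id)) := by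
  induction t generalizing x with
  | nil => rfl
  | cons y t ih =>
    cases y with
    | none => simpa [lmax, omax2_none_left] using ih x
    | some y =>
      show omax2 (some x) (omax2 (some y) (lmax t)) = _
      rw [omax2_some_some, ih]
      simp

theorem max?_eq_lmax (cm : List (Option Int)) :
    PySem.List.max? (cm.filterMap id) (fun x => x) = lmax cm := by
  induction cm with
  | nil => rfl
  | cons x t ih =>
    cases x with
    | none => simpa [lmax, omax2_none_left] using ih
    | some x =>
      simp only [List.filterMap_cons, id, lmax]
      rw [PySem.List.max?_id_cons, lmax_filterMap]
      rfl

theorem stepB_fill (arr : List (List Int)) (acc : List (Option Int)) (last : Option Int) :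
    (arr.foldl stepB (acc, last)).1 = acc ++ fill last arr := by
  induction arr generalizing acc last with
  | nil => simp [fill]
  | cons s r ih =>
    simp only [List.foldl_cons, stepB, fill]
    rw [ih]
    simp [List.length_eq_zero_iff]

theorem A_char (arr : List (List Int)) (maxn cur idx : Option Int) (i0 : Int) :
    ((PySem.List.enumerate arr i0).foldl stepA (maxn, cur, idx)).2.2
      = if optGt (lmax (fill cur arr)) maxn = true
        then Option.map (fun (k : Nat) => i0 + (k : Int)) (PySem.List.index? (fill cur arr) (lmax (fill cur arr)))
        else idx := by
  induction arr generalizing maxn cur idx i0 with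
  | nil => simp [fill, lmax, optGt]
  | cons s r ih =>
    rw [PySem.List.enumerate_cons, List.foldl_cons]
    have hfill : fill cur (s :: r)
        = (if s.length ≠ 0 then PySem.List.max? s (fun x => x) else cur)
          :: fill (if s.length ≠ 0 then PySem.List.max? s (fun x => x) else cur) r := rfl
    set cur' := if s.length ≠ 0 then PySem.List.max? s (fun x => x) else cur with hcur'
    set mr := lmax (fill cur' r) with hmr
    rw [hfill]
    show ((PySem.List.enumerate r (i0 + 1)).foldl stepA (stepA (maxn, cur, idx) (i0, s))).2.2 = _
    have hstep : stepA (maxn, cur, idx) (i0, s)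
        = if optGt cur' maxn then (cur', cur', some i0) else (maxn, cur', idx) := by
      simp only [stepA, ← hcur']
    have hl : lmax (cur' :: fill cur' r) = omax2 cur' mr := rfl
    rw [hstep, hl]
    cases hrec : optGt cur' maxn with
    | true =>
      rw [if_pos rfl, ih]
      cases hmgt : optGt mr cur' with
      | true =>
        have h1 : omax2 cur' mr = mr := by simp [omax2, hmgt]
        have h2 : optGt mr maxn = true := optGt_gt_gt hmgt hrec
        rw [if_pos rfl, h1, if_pos h2,
          PySem.List.index?_cons_of_ne _ (optGt_ne hmgt), Option.map_map]
        apply Option.map_congr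
        intro k _
        dsimp only [Function.comp]
        omega
      | false =>
        have h1 : omax2 cur' mr = cur' := by simp [omax2, hmgt]
        rw [if_neg (by simp), h1, if_pos hrec, PySem.List.index?_cons_self]
        simp
    | false =>
      rw [if_neg (by simp), ih]
      cases hmgt : optGt mr cur' with
      | true =>
        have h1 : omax2 cur' mr = mr := by simp [omax2, hmgt]
        rw [h1]
        cases hmn : optGt mr maxn with
        | true =>
          rw [if_pos rfl, if_pos rfl,
            PySem.List.index?_cons_of_ne _ (optGt_ne hmgt), Option.map_map]
          apply Option.map_congr
          intro k _
          dsimp only [Function.comp]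
          omega
        | false => rw [if_neg (by simp), if_neg (by simp)]
      | false =>
        have h1 : omax2 cur' mr = cur' := by simp [omax2, hmgt]
        have h2 : optGt (lmax (fill cur' r)) maxn = false := by
          rw [← hmr]; exact optGt_le_le hmgt hrec
        rw [h1, if_neg (by simp [h2]), if_neg (by simp [hrec])]

-- ===== VERDICT (by name: the statement is the Claim_ definition above) =====
theorem find_max_match_index_spec : Claim_equal_find_max_match_index := by
  intro arr _
  unfold Spec_find_max_match_index find_max_match_index find_max_match_index_alt
  rw [stepB_fill, A_char]
  simp only [List.nil_append]
  rw [max?_eq_lmax]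
  cases h : lmax (fill none arr) with
  | none => simp [optGt]
  | some m =>
    rw [if_pos (by simp [optGt_none_right])]
    dsimp only
    apply Option.map_congr
    intro k _
    simp
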